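-- pv_equiv track=rewrite | github.com/HanSu-yeon/Algorithm | boj/1668.py | ascending
-- ===== SOURCE A (Python) =====
-- def ascending(arr):
--     now = arr[0]
--     result = 1
--     for i in range(1, len(arr)):
--         if now < arr[i]:
--             result += 1
--             now = arr[i]
--     return result
-- ===== SOURCE B (Python) =====
-- def ascending(arr):
--     m = arr[0]
--     maxima = []
--     for x in arr:
--         m = m if m >= x else x
--         maxima.append(m)
--     return len(set(maxima))
-- ===== Notes on version B (the rewrite author's own statement) =====
-- stated objective: alternative
-- what changed: Replaces A's fused compare-and-increment scan with a build-then-count decomposition: build the running-maximum sequence, then return its number of distinct values.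
import Mathlib
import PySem

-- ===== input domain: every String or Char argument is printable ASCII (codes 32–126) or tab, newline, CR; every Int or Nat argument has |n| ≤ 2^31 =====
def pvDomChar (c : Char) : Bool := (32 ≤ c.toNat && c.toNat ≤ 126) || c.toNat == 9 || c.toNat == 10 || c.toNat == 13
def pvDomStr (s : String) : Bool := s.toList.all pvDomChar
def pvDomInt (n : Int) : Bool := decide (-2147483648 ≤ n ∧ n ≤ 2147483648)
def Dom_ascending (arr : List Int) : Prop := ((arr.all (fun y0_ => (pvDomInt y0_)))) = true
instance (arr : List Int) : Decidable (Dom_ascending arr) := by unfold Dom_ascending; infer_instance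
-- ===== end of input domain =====

-- B builds the running-maximum sequence and counts its distinct values (build-then-count
-- decomposition) instead of A's fused compare-and-increment scan; return values agree on
-- every non-empty list.

-- ===== PORT A =====
-- arr[i] is ported as pyGetD arr i 0: every index drawn from range(1, len(arr)) is in
-- range, so this is exact.
def ascending (arr : List Int) : Int :=
  match arr with
  | [] => 0  -- Python raises IndexError on arr[0]; excluded by Pre_ascending
  | a :: _ =>
    let st := (PySem.List.pyRange 1 (PySem.List.len arr) 1).foldl
      (fun (s : Int × Int) i =>
        if s.1 < PySem.List.pyGetD arr i 0 then (PySem.List.pyGetD arr i 0, s.2 + 1) else s)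
      (a, 1)
    st.2

-- ===== PORT B =====
def ascending_alt (arr : List Int) : Int :=
  match arr with
  | [] => 0  -- Python raises IndexError on arr[0]; excluded by Pre_ascending
  | a :: _ =>
    let st := arr.foldl
      (fun (p : Int × List Int) x =>
        let m := if p.1 ≥ x then p.1 else x
        (m, p.2 ++ [m]))
      (a, ([] : List Int))
    ((PySem.Set.ofList st.2).length : Int)

-- ===== PRECONDITION & SPEC =====
-- A (and B) raise IndexError on the empty list (arr[0]); Pre_ excludes exactly that input.
def Pre_ascending (arr : List Int) : Prop := arr ≠ []
instance (arr : List Int) : Decidable (Pre_ascending arr) := by unfold Pre_ascending; infer_instance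
def pvWitness_ascending : List Int := ([1, 0, 2] : List Int)

def Spec_ascending (arr : List Int) (out : Int) : Prop := out = ascending_alt arr
instance (arr : List Int) (out : Int) : Decidable (Spec_ascending arr out) := by unfold Spec_ascending; infer_instance

-- ===== CLAIM (what is proved, stated in full; the proofs are below) =====
def Claim_equal_ascending : Prop := ∀ (arr : List Int), Dom_ascending arr → Pre_ascending arr → Spec_ascending arr (ascending arr)

-- ===== LEMMAS AND PROOFS =====

-- the running-maximum sequence of t continued from current maximum m
def pvChain (m : Int) : List Int → List Int
  | [] => []
  | x :: t => (if m ≥ x then m else x) :: pvChain (if m ≥ x then m else x) t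

theorem pvChain_ge (t : List Int) (m y : Int) (hy : y ∈ pvChain m t) : m ≤ y := by
  induction t generalizing m with
  | nil => simp [pvChain] at hy
  | cons x t ih =>
    simp only [pvChain, List.mem_cons] at hy
    rcases hy with h | h
    · subst h; split <;> omega
    · have := ih _ h
      split at this <;> omega

-- B's accumulated list is acc ++ pvChain m t
theorem pvFoldB (t : List Int) (m : Int) (acc : List Int) :
    (t.foldl (fun (p : Int × List Int) x =>
      let m := if p.1 ≥ x then p.1 else x
      (m, p.2 ++ [m])) (m, acc)).2 = acc ++ pvChain m t := by
  induction t generalizing m acc with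
  | nil => simp [pvChain]
  | cons x t ih => simp [List.foldl_cons, pvChain, ih]

theorem pv_len_ofList_eq_dedup (l : List Int) :
    (PySem.Set.ofList l).length = l.dedup.length := by
  refine List.Perm.length_eq ?_
  refine (List.perm_ext_iff_of_nodup (PySem.Set.nodup_ofList l) l.nodup_dedup).2 ?_
  intro a
  simp [PySem.Set.mem_ofList, List.mem_dedup]

-- A's counter equals r - 1 plus the number of distinct running maxima
theorem pvFoldA (t : List Int) (m r : Int) :
    (t.foldl (fun (s : Int × Int) x => if s.1 < x then (x, s.2 + 1) else s) (m, r)).2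
      = r - 1 + ((m :: pvChain m t).dedup.length : Int) := by
  induction t generalizing m r with
  | nil => simp [pvChain]
  | cons x t ih =>
    simp only [List.foldl_cons]
    by_cases h : m < x
    · have hge : ¬ m ≥ x := by omega
      have hnot : m ∉ (x :: pvChain x t) := by
        intro hm
        rcases List.mem_cons.mp hm with h' | h'
        · omega
        · have := pvChain_ge _ _ _ h'; omega
      rw [if_pos h, ih]
      simp only [pvChain, if_neg hge]
      rw [List.dedup_cons_of_notMem hnot]
      simp only [List.length_cons]
      push_cast
      omega
    · have hge : m ≥ x := by omega
      rw [if_neg h, ih]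
      simp only [pvChain, if_pos hge]
      rw [List.dedup_cons_of_mem (List.mem_cons_self)]

-- ===== VERDICT (by name: the statement is the Claim_ definition above) =====
theorem ascending_spec : Claim_equal_ascending := by
  intro arr _ hpre
  unfold Spec_ascending ascending ascending_alt
  match arr with
  | [] => exact absurd rfl hpre
  | a :: t =>
    simp only
    rw [PySem.List.foldl_pyRange_pyGetD (a :: t) 0
      (fun (s : Int × Int) x => if s.1 < x then (x, s.2 + 1) else s) (a, 1) (by norm_num)]
    simp only [Int.toNat_one, List.drop_succ_cons, List.drop_zero, List.foldl_cons]
    rw [pvFoldA, pvFoldB]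
    have : (if a ≥ a then a else a) = a := by simp
    simp only [this, List.nil_append, List.singleton_append]
    rw [pv_len_ofList_eq_dedup]
    omega
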